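-- pv_equiv track=rewrite | github.com/dharmamitra/dharmanexus | api/colormaps.py | create_segmented_text_color_only
-- ===== SOURCE A (Python) =====
-- def create_segmented_text_color_only(text, colormap):
--     """create segmented text color"""
--     result_segments = []
--     current_segment = ""
--     last_color = colormap[0]
--     for i, _ in enumerate(text):
--         current_color = colormap[i]
--         if current_color != last_color:
--             result_segments.append(
--                 {"text": current_segment, "highlightColor": last_color}
--             )
--             current_segment = ""
--         current_segment += text[i]
--         last_color = current_color
--     result_segments.append({"text": current_segment, "highlightColor": last_color})
--     return result_segments
-- ===== SOURCE B (Python) =====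
-- def create_segmented_text_color_only(text, colormap):
--     """create segmented text color"""
--     n = len(text)
--     cuts = [0] + [i for i in range(1, n) if colormap[i] != colormap[i - 1]] + [n]
--     return [
--         {"text": text[c:d], "highlightColor": colormap[c]}
--         for c, d in zip(cuts, cuts[1:])
--     ]
-- ===== Notes on version B (the rewrite author's own statement) =====
-- stated objective: simpler
-- what changed: B drops A's running-state loop (current-segment and last-color accumulators mutated per character) and instead computes the list of color-change cut positions once, then emits one segment per consecutive cut pair by slicing the text.
-- outside the precondition, e.g. on create_segmented_text_color_only('ab', ['r']): A raises IndexError, B raises IndexError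
import Mathlib
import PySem

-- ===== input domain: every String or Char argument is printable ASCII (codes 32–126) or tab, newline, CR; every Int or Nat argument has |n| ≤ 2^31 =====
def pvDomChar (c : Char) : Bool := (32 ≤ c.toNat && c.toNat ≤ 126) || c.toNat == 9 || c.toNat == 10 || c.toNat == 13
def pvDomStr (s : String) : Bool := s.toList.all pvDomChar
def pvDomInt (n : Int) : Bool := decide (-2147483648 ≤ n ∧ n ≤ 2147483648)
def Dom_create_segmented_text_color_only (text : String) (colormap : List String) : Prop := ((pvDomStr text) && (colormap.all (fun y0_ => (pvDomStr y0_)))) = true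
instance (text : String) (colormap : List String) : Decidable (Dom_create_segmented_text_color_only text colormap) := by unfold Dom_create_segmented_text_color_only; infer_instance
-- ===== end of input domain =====

-- B replaces A's running-state loop (current segment / last color accumulators) by computing the
-- color-change cut positions and slicing the text between consecutive cuts (objective: simpler).

-- ===== PORT A =====
-- loop body of A's `for i, _ in enumerate(text)` loop (i runs over 0..len(text)-1; text[i] and
-- colormap[i] are always in range there under Pre_, so getD is exact)
def pvStepA (colormap : List String) (cs : List Char)
    (st : List (List (String × String)) × String × String) (i : Nat) :
    List (List (String × String)) × String × String :=
  let current_color := colormap.getD i ""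
  let st1 := if current_color ≠ st.2.2
    then (st.1 ++ [[("text", st.2.1), ("highlightColor", st.2.2)]], "")
    else (st.1, st.2.1)
  (st1.1, st1.2.push (cs.getD i ' '), current_color)

def create_segmented_text_color_only (text : String) (colormap : List String) : List (List (String × String)) :=
  match (List.range text.toList.length).foldl (pvStepA colormap text.toList) ([], "", colormap.getD 0 "") with
  | (result_segments, current_segment, last_color) =>
      result_segments ++ [[("text", current_segment), ("highlightColor", last_color)]]

-- ===== PORT B =====
-- cuts = [0] + [i for i in range(1, n) if colormap[i] != colormap[i-1]] + [n]
def pvCutsB (text : String) (colormap : List String) : List Nat :=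
  [0] ++ (List.range' 1 (text.toList.length - 1)).filter
      (fun i => colormap.getD i "" != colormap.getD (i - 1) "") ++ [text.toList.length]

def create_segmented_text_color_only_alt (text : String) (colormap : List String) : List (List (String × String)) :=
  -- zip(cuts, cuts[1:]); text[c:d] is the slice
  ((pvCutsB text colormap).zip (pvCutsB text colormap).tail).map (fun cd =>
    [("text", String.ofList (PySem.List.slice text.toList (some (cd.1 : Int)) (some (cd.2 : Int)))),
     ("highlightColor", colormap.getD cd.1 "")])

-- ===== PRECONDITION & SPEC =====
-- Pre_ excludes exactly the inputs on which Python A raises IndexError: an empty colormap, or a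
-- colormap shorter than the text.
def Pre_create_segmented_text_color_only (text : String) (colormap : List String) : Prop :=
  colormap ≠ [] ∧ text.toList.length ≤ colormap.length
instance (text : String) (colormap : List String) : Decidable (Pre_create_segmented_text_color_only text colormap) := by unfold Pre_create_segmented_text_color_only; infer_instance
def pvWitness_create_segmented_text_color_only : String × List String := ("aab", ["r", "r", "b"])

def Spec_create_segmented_text_color_only (text : String) (colormap : List String) (out : List (List (String × String))) : Prop := out = create_segmented_text_color_only_alt text colormap
instance (text : String) (colormap : List String) (out : List (List (String × String))) : Decidable (Spec_create_segmented_text_color_only text colormap out) := by unfold Spec_create_segmented_text_color_only; infer_instance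

-- ===== CLAIM (what is proved, stated in full; the proofs are below) =====
def Claim_equal_create_segmented_text_color_only : Prop := ∀ (text : String) (colormap : List String), Dom_create_segmented_text_color_only text colormap → Pre_create_segmented_text_color_only text colormap → Spec_create_segmented_text_color_only text colormap (create_segmented_text_color_only text colormap)

-- ===== LEMMAS AND PROOFS =====

theorem pvMkPush (l : List Char) (c : Char) :
    (String.ofList l).push c = String.ofList (l ++ [c]) := by
  apply String.ext; simp

-- the segment B emits for the cut pair (c, d)
def pvSeg (cs : List Char) (m : List String) (c d : Nat) : List (String × String) :=
  [("text", String.ofList ((cs.drop c).take (d - c))), ("highlightColor", m.getD c "")]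

-- the cut positions strictly below k (k ≥ 1): 0 plus every color change in 1..k-1
def pvCuts (m : List String) (k : Nat) : List Nat :=
  0 :: (List.range' 1 (k - 1)).filter (fun i => m.getD i "" != m.getD (i - 1) "")

def pvLast (m : List String) (k : Nat) : Nat := (pvCuts m k).getLastD 0

def pvZipC (l : List Nat) : List (Nat × Nat) := l.zip l.tail

theorem pvZipC_append (ys : List Nat) (b : Nat) (h : ys ≠ []) :
    pvZipC (ys ++ [b]) = pvZipC ys ++ [(ys.getLastD 0, b)] := by
  induction ys with
  | nil => exact absurd rfl h
  | cons x xs ih =>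
    cases xs with
    | nil => simp [pvZipC]
    | cons y ys' =>
      have := ih (by simp)
      simp only [pvZipC, List.cons_append, List.tail_cons, List.zip_cons_cons] at this ⊢
      simp [this, List.getLastD]

theorem pvCuts_ne_nil (m : List String) (k : Nat) : pvCuts m k ≠ [] := by
  simp [pvCuts]

theorem pvCuts_succ (m : List String) (k : Nat) (hk : 1 ≤ k) :
    pvCuts m (k + 1) =
      if m.getD k "" != m.getD (k - 1) "" then pvCuts m k ++ [k] else pvCuts m k := by
  have h1 : (k + 1) - 1 = (k - 1) + 1 := by omega
  have h2 : 1 + 1 * (k - 1) = k := by omega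
  simp only [pvCuts, h1, List.range'_concat, List.filter_append, List.filter_cons,
    List.filter_nil, h2]
  split_ifs with h <;> simp

theorem pvStepA_eq (m : List String) (cs : List Char)
    (res : List (List (String × String))) (cur last : String) (i : Nat) :
    pvStepA m cs (res, cur, last) i =
      if m.getD i "" = last then (res, cur.push (cs.getD i ' '), m.getD i "")
      else (res ++ [[("text", cur), ("highlightColor", last)]],
        ("" : String).push (cs.getD i ' '), m.getD i "") := by
  unfold pvStepA
  dsimp only
  by_cases h : m.getD i "" = last
  · rw [if_neg (not_not_intro h), if_pos h]
  · rw [if_pos h, if_neg h]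

-- the main loop invariant for A's fold: after k iterations the emitted segments are those of the
-- consecutive cut pairs below k, the current segment starts at the last cut, and the last color is
-- colormap[k-1] = colormap[last cut]
theorem pvInv (m : List String) (cs : List Char) (k : Nat) (hk1 : 1 ≤ k) (hk : k ≤ cs.length) :
    (List.range k).foldl (pvStepA m cs) ([], "", m.getD 0 "") =
      ((pvZipC (pvCuts m k)).map (fun p => pvSeg cs m p.1 p.2),
        String.ofList ((cs.take k).drop (pvLast m k)), m.getD (k - 1) "")
    ∧ m.getD (k - 1) "" = m.getD (pvLast m k) ""
    ∧ pvLast m k < k := by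
  induction k with
  | zero => omega
  | succ k ih =>
    rcases Nat.lt_or_ge k 1 with hk0 | hk0
    · -- k = 0 : base case, one iteration at index 0
      have hk0' : k = 0 := by omega
      subst hk0'
      have h0 : 0 < cs.length := by omega
      refine ⟨?_, by simp [pvLast, pvCuts], by simp [pvLast, pvCuts]⟩
      cases cs with
      | nil => simp at h0
      | cons c t =>
        have hpush : (("" : String).push c) = String.ofList [c] := by
          apply String.ext; simp
        simp [pvStepA, pvZipC, pvCuts, pvLast, hpush]
    · -- k ≥ 1 : inductive step at index k
      have hklen : k < cs.length := by omega
      obtain ⟨ihst, ihcol, ihlast⟩ := ih hk0 (by omega)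
      rw [List.range_succ, List.foldl_append, ihst]
      simp only [List.foldl_cons, List.foldl_nil]
      have hcuts := pvCuts_succ m k hk0
      have htake : cs.take (k + 1) = cs.take k ++ [cs[k]] := by
        rw [List.take_add_one, List.getElem?_eq_getElem hklen]; rfl
      have hgetc : cs.getD k ' ' = cs[k] := List.getD_eq_getElem cs ' ' hklen
      by_cases hc : m.getD k "" = m.getD (k - 1) ""
      · -- same color: the current segment is extended
        have hcuts' : pvCuts m (k + 1) = pvCuts m k := by
          rw [hcuts, if_neg (by simp only [bne_iff_ne, ne_eq, not_not]; exact hc)]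
        have hlast' : pvLast m (k + 1) = pvLast m k := by
          unfold pvLast; rw [hcuts']
        have hdrop : (cs.take (k + 1)).drop (pvLast m k) =
            (cs.take k).drop (pvLast m k) ++ [cs[k]] := by
          rw [htake, List.drop_append_of_le_length (by simp; omega)]
        refine ⟨?_, ?_, by omega⟩
        · rw [pvStepA_eq, if_pos hc]
          simp only [Prod.mk.injEq]
          refine ⟨by rw [hcuts'], ?_, by simp⟩
          rw [hgetc, pvMkPush, hlast', hdrop]
        · show m.getD k "" = m.getD (pvLast m (k + 1)) ""
          rw [hlast', hc]; exact ihcol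
      · -- color change: the segment at cut pvLast m k is closed, a new one starts at k
        have hcuts' : pvCuts m (k + 1) = pvCuts m k ++ [k] := by
          rw [hcuts, if_pos (by simp only [bne_iff_ne, ne_eq]; exact hc)]
        have hlast' : pvLast m (k + 1) = k := by
          unfold pvLast; rw [hcuts']; simp
        have hseg : pvSeg cs m (pvLast m k) k =
            [("text", String.ofList ((cs.take k).drop (pvLast m k))),
             ("highlightColor", m.getD (k - 1) "")] := by
          unfold pvSeg
          rw [List.drop_take, ← ihcol]
        have hdrop1 : (cs.take (k + 1)).drop k = [cs[k]] := by
          rw [htake, List.drop_append_of_le_length (by simp; omega)]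
          simp [List.drop_eq_nil_of_le]
        have hpush : (("" : String).push cs[k]) = String.ofList [cs[k]] := by
          apply String.ext; simp
        refine ⟨?_, by simp [hlast'], by omega⟩
        rw [pvStepA_eq, if_neg hc]
        simp only [Prod.mk.injEq]
        refine ⟨?_, ?_, by simp⟩
        · rw [hcuts', pvZipC_append _ _ (pvCuts_ne_nil m k), List.map_append]
          simp only [List.map_cons, List.map_nil]
          rw [show (pvCuts m k).getLastD 0 = pvLast m k from rfl, hseg]
        · rw [hlast', hdrop1, hgetc, hpush]

-- B's output, rewritten through pvSeg / pvZipC / pvCuts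
theorem pvAltEq (text : String) (m : List String) :
    create_segmented_text_color_only_alt text m =
      (pvZipC (pvCuts m text.toList.length)).map (fun p => pvSeg text.toList m p.1 p.2)
        ++ [pvSeg text.toList m (pvLast m text.toList.length) text.toList.length] := by
  unfold create_segmented_text_color_only_alt
  have hcuts : pvCutsB text m = pvCuts m text.toList.length ++ [text.toList.length] := by
    simp [pvCutsB, pvCuts]
  rw [hcuts, show ((pvCuts m text.toList.length ++ [text.toList.length]).zip
      (pvCuts m text.toList.length ++ [text.toList.length]).tail)
      = pvZipC (pvCuts m text.toList.length ++ [text.toList.length]) from rfl,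
    pvZipC_append _ _ (pvCuts_ne_nil m text.toList.length), List.map_append]
  congr 1
  · apply List.map_congr_left
    intro p _
    simp [pvSeg, PySem.List.slice_natCast]
  · simp [pvSeg, pvLast, PySem.List.slice_natCast]

-- ===== VERDICT (by name: the statement is the Claim_ definition above) =====
theorem create_segmented_text_color_only_spec : Claim_equal_create_segmented_text_color_only := by
  intro text colormap _ _
  unfold Spec_create_segmented_text_color_only
  rcases Nat.eq_zero_or_pos text.toList.length with h0 | hpos
  · -- empty text: both return one empty segment carrying colormap[0]
    have hnil : text.toList = [] := List.eq_nil_of_length_eq_zero h0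
    unfold create_segmented_text_color_only create_segmented_text_color_only_alt pvCutsB
    simp [hnil, PySem.List.slice]
  · obtain ⟨hst, hcol, hlast⟩ := pvInv colormap text.toList text.toList.length hpos le_rfl
    unfold create_segmented_text_color_only
    rw [hst, pvAltEq text colormap]
    have hd : ((text.toList.take text.toList.length).drop (pvLast colormap text.toList.length))
        = (text.toList.drop (pvLast colormap text.toList.length)).take
            (text.toList.length - pvLast colormap text.toList.length) := by
      rw [List.take_length, List.take_of_length_le (by simp)]
    unfold pvSeg
    rw [hd, hcol]
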